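-- pv_equiv track=rewrite | github.com/RuofanChen03/CSCA08 | a2/voting_systems.py | voting_range
-- ===== SOURCE A (Python) =====
-- from typing import List
--
-- def voting_range(range_ballots: List[List[int]],
--                  party_order: List[str]) -> List[int]:
--     """Return the total score for each party in range ballots
--     range_ballots, in the order specified in party_order.
--
--     Pre: len of each sublist of range_ballots is len(party_order)
--          the scores in each ballot are specified in the order of party_order
--
--     >>> voting_range([[1, 3, 4, 5], [5, 5, 1, 2], [1, 4, 1, 1]],
--     ...              SAMPLE_ORDER_1)
--     [7, 12, 6, 8]
--     >>> voting_range([[4, 0, 5, 0], [4, 5, 5, 5],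
--     ...                  [0, 1, 1, 5]], SAMPLE_ORDER_1)
--     [8, 6, 11, 10]
--     >>> voting_range([], SAMPLE_ORDER_1)
--     [0, 0, 0, 0]
--     """
--
--     # Initializing the summary of votes to be 0 for each party.
--     vote_summary = []
--     for i in party_order:
--         vote_summary.append(0)
--     # The votes sum of the parties is then modified & returned.
--     for vote in range_ballots:
--         for i in range(len(party_order)):
--             vote_summary[i] += vote[i]
--     return vote_summary
-- ===== SOURCE B (Python) =====
-- from typing import List
--
-- def voting_range(range_ballots: List[List[int]],
--                  party_order: List[str]) -> List[int]:
--     # Recursive decomposition: the totals are the first ballot vector-added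
--     # (element-wise via zip) to the totals of the remaining ballots.
--     if not range_ballots:
--         return [0] * len(party_order)
--     rest = voting_range(range_ballots[1:], party_order)
--     return [s + t for s, t in zip(range_ballots[0], rest)]
-- ===== Notes on version B (the rewrite author's own statement) =====
-- stated objective: alternative
-- what changed: Replaces the zero-initialization loop plus index-based in-place accumulation over all ballots with a structural recursion on the ballot list that vector-adds the head ballot (element-wise via zip, no indices) to the recursively computed totals of the tail.
import Mathlib
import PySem

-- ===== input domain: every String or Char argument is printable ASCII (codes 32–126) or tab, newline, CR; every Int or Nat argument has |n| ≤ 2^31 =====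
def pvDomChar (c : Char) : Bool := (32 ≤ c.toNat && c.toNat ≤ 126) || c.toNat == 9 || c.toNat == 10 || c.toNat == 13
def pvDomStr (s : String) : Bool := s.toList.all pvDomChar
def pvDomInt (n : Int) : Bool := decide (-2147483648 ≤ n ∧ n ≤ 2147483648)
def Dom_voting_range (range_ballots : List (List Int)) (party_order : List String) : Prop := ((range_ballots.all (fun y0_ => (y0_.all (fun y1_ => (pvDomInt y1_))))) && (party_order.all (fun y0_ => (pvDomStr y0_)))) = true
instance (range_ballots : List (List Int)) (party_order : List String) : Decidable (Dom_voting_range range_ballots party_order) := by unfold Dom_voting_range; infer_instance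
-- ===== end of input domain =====

-- B replaces A's zero-initialization loop plus index-based in-place accumulation with a
-- structural recursion on the ballot list that vector-adds the head ballot (via zip, no
-- indices) to the recursively computed totals of the rest (alternative decomposition).


-- ===== PORT A =====
-- Literal port of A: build a zero list by appending, then for each ballot add vote[i]
-- into vote_summary[i] for i in range(len(party_order)).  pyGetD/pySetD are exact under
-- Pre_voting_range (every index used is in range there).
def voting_range (range_ballots : List (List Int)) (party_order : List String) : List Int :=
  let vote_summary := party_order.foldl (fun acc _ => acc ++ [(0 : Int)]) []
  range_ballots.foldl (fun vs vote =>
    (PySem.List.pyRange 0 (party_order.length : Int) 1).foldl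
      (fun vs i =>
        PySem.List.pySetD vs i (PySem.List.pyGetD vs i 0 + PySem.List.pyGetD vote i 0)) vs)
    vote_summary

-- ===== PORT B =====
-- Literal port of B: recursion on range_ballots; [] -> [0]*len(party_order),
-- first::rest -> [s + t for s, t in zip(first, voting_range(rest, party_order))].
def voting_range_alt (range_ballots : List (List Int)) (party_order : List String) : List Int :=
  match range_ballots with
  | [] => List.replicate party_order.length 0
  | first :: rest =>
      (List.zip first (voting_range_alt rest party_order)).map (fun p => p.1 + p.2)

-- ===== PRECONDITION & SPEC =====
-- Pre_ excludes exactly the inputs where Python A raises IndexError: a ballot shorter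
-- than party_order (A's documented precondition).
def Pre_voting_range (range_ballots : List (List Int)) (party_order : List String) : Prop :=
  ∀ b ∈ range_ballots, party_order.length ≤ b.length
instance (range_ballots : List (List Int)) (party_order : List String) : Decidable (Pre_voting_range range_ballots party_order) := by unfold Pre_voting_range; infer_instance

def pvWitness_voting_range : List (List Int) × List String :=
  ([[1, 3], [5, 5], [1, 4]], ["A", "B"])

def Spec_voting_range (range_ballots : List (List Int)) (party_order : List String) (out : List Int) : Prop := out = voting_range_alt range_ballots party_order
instance (range_ballots : List (List Int)) (party_order : List String) (out : List Int) : Decidable (Spec_voting_range range_ballots party_order out) := by unfold Spec_voting_range; infer_instance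

-- ===== CLAIM (what is proved, stated in full; the proofs are below) =====
def Claim_equal_voting_range : Prop := ∀ (range_ballots : List (List Int)) (party_order : List String), Dom_voting_range range_ballots party_order → Pre_voting_range range_ballots party_order → Spec_voting_range range_ballots party_order (voting_range range_ballots party_order)

-- ===== LEMMAS AND PROOFS =====

-- setting / reading at the junction of an append
theorem pv_set_append_len {α : Type} (u : List α) (x v : α) (w : List α) :
    (u ++ x :: w).set u.length v = u ++ v :: w := by
  induction u with
  | nil => simp
  | cons a u ih => simp [ih]

theorem pv_getD_append_len {α : Type} (u : List α) (x : α) (w : List α) (d : α) :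
    (u ++ x :: w).getD u.length d = x := by
  induction u with
  | nil => simp [List.getD]
  | cons a u ih => simp [List.getD]

-- A's inner loop over indices u.length .. u.length + w.length - 1, applied to u ++ w,
-- leaves u alone and adds vote[idx] to each entry of w.
theorem pv_inner (vote : List Int) (w : List Int) : ∀ (u : List Int),
    ((List.range w.length).map (fun j => ((u.length + j : Nat) : Int))).foldl
      (fun vs i =>
        PySem.List.pySetD vs i (PySem.List.pyGetD vs i 0 + PySem.List.pyGetD vote i 0)) (u ++ w)
    = u ++ (List.range w.length).map
        (fun j => w.getD j 0 + PySem.List.pyGetD vote ((u.length + j : Nat) : Int) 0) := by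
  induction w with
  | nil => intro u; simp
  | cons x w ih =>
    intro u
    rw [List.length_cons, List.range_succ_eq_map, List.map_cons, List.map_map]
    rw [List.foldl_cons]
    have hstep :
        PySem.List.pySetD (u ++ x :: w) ((u.length + 0 : Nat) : Int)
          (PySem.List.pyGetD (u ++ x :: w) ((u.length + 0 : Nat) : Int) 0 +
           PySem.List.pyGetD vote ((u.length + 0 : Nat) : Int) 0)
        = (u ++ [x + PySem.List.pyGetD vote (u.length : Int) 0]) ++ w := by
      simp only [Nat.add_zero, PySem.List.pySetD_natCast, PySem.List.pyGetD_natCast,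
        pv_getD_append_len, pv_set_append_len]
      simp
    rw [hstep]
    have hfun : ((fun j => ((u.length + j : Nat) : Int)) ∘ (fun i => i + 1))
        = fun j => (((u ++ [x + PySem.List.pyGetD vote (u.length : Int) 0]).length + j : Nat) : Int) := by
      funext j
      simp [Function.comp]
      push_cast
      ring
    rw [hfun, ih]
    simp only [List.map_cons, List.map_map, List.append_assoc, List.cons_append,
      List.nil_append, List.getD_cons_zero, Nat.add_zero,
      List.length_append, List.length_cons, List.length_nil]
    congr 1
    congr 1
    refine List.map_congr_left (fun j _ => ?_)
    simp only [Function.comp_apply, List.getD_cons_succ]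
    have harg : (u.length + (0 + 1) + j : Nat) = u.length + j.succ := by omega
    rw [harg]

-- outer accumulation: folding ballots into (range n).map g yields per-index sums
theorem pv_outer (n : Nat) (rb : List (List Int)) : ∀ (g : Nat → Int),
    rb.foldl (fun vs vote =>
        ((List.range n).map (fun j => ((j : Nat) : Int))).foldl
          (fun vs i =>
            PySem.List.pySetD vs i (PySem.List.pyGetD vs i 0 + PySem.List.pyGetD vote i 0)) vs)
      ((List.range n).map g)
    = (List.range n).map
        (fun i => rb.foldl (fun s ballot => s + PySem.List.pyGetD ballot ((i : Nat) : Int) 0) (g i)) := by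
  induction rb with
  | nil => intro g; simp
  | cons vote rb ih =>
    intro g
    have hin := pv_inner vote ((List.range n).map g) []
    simp only [List.nil_append, List.length_map, List.length_range, List.length_nil,
      Nat.zero_add] at hin
    rw [List.foldl_cons, hin]
    have hmap : (List.range n).map
          (fun j => ((List.range n).map g).getD j 0 + PySem.List.pyGetD vote ((j : Nat) : Int) 0)
        = (List.range n).map (fun j => g j + PySem.List.pyGetD vote ((j : Nat) : Int) 0) := by
      refine List.map_congr_left ?_
      intro j hj
      simp only [List.mem_range] at hj
      simp [List.getD_eq_getElem?_getD, List.getElem?_map, List.getElem?_range hj]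
    rw [hmap, ih]
    rfl

-- A's initialization loop builds a list of zeros of party_order's length
theorem pv_init (po : List String) : ∀ (acc : List Int),
    po.foldl (fun a _ => a ++ [(0 : Int)]) acc = acc ++ List.replicate po.length 0 := by
  induction po with
  | nil => intro acc; simp
  | cons p po ih => intro acc; simp [ih, ← List.replicate_succ]

-- pulling the initial value out of the summation fold
theorem pv_foldl_shift (h : List Int → Int) (l : List (List Int)) : ∀ (a : Int),
    l.foldl (fun s b => s + h b) a = a + l.foldl (fun s b => s + h b) 0 := by
  induction l with
  | nil => intro a; simp
  | cons b l ih =>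
    intro a
    rw [List.foldl_cons, List.foldl_cons, ih (a + h b), ih (0 + h b)]
    ring

-- characterization of B's recursion as per-index column sums (under Pre_)
theorem pv_alt_char (po : List String) (rb : List (List Int))
    (hpre : ∀ b ∈ rb, po.length ≤ b.length) :
    voting_range_alt rb po
    = (List.range po.length).map
        (fun i => rb.foldl (fun s ballot => s + PySem.List.pyGetD ballot ((i : Nat) : Int) 0) 0) := by
  induction rb with
  | nil => simp [voting_range_alt, List.map_const']
  | cons first rest ih =>
    have hfirst : po.length ≤ first.length := hpre first (by simp)
    have hrest := ih (fun b hb => hpre b (by simp [hb]))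
    show (List.zip first (voting_range_alt rest po)).map (fun p => p.1 + p.2) = _
    rw [hrest]
    apply List.ext_getElem
    · simp [List.length_zip]; omega
    · intro i h1 h2
      have hi : i < po.length := by
        simp [List.length_zip] at h1; omega
      have hif : i < first.length := lt_of_lt_of_le hi hfirst
      have hget : PySem.List.pyGetD first ((i : Nat) : Int) 0 = first[i] := by
        rw [PySem.List.pyGetD_natCast]
        simp [List.getD_eq_getElem?_getD, List.getElem?_eq_getElem hif]
      simp only [List.getElem_map, List.getElem_zip, List.getElem_range, List.foldl_cons,
        Int.zero_add, hget]
      rw [pv_foldl_shift (fun b => PySem.List.pyGetD b ((i : Nat) : Int) 0) rest first[i]]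

-- ===== VERDICT (by name: the statement is the Claim_ definition above) =====
theorem voting_range_spec : Claim_equal_voting_range := by
  intro rb po _ hpre
  unfold Spec_voting_range voting_range
  rw [pv_init po []]
  simp only [List.nil_append, PySem.List.pyRange_zero_nat]
  have hrep : List.replicate po.length (0 : Int)
      = (List.range po.length).map (fun _ => (0 : Int)) := by
    simp [List.map_const']
  rw [hrep, pv_outer po.length rb (fun _ => (0 : Int)), pv_alt_char po rb hpre]
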